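/- GENERATED by mk_final_copies.py from the proof of the farm's unit `decode_residue.3` (farm:decode_residue.3.1: Proof.lean) as the
   re-elaboration sweep compiled it — do not edit. -/
import Asan.CheckWalk
import Vorbis.Spec.Units.decode_residue_3
import Vorbis.Spec.Worked.decode_residue_3_Lemmas

/-!
  Proof unit `decode_residue.3`: segment 3 of `decode_residue` (path A control; stb_vorbis_fixed.c 2157–2165, 2211).

      entry 1  0x10ef08  loop 2157 `for (j=0; j < ch; ++j) if (!do_not_decode[j]) break;`, `if (j == ch) goto done;`,
                         the init of the pass loop 2163 (`pass = 0`), its head and the dispatch on `ch`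
      entry 2  0x10f6a0  the latch of the pass loop (`++pass`), its head and the dispatch on `ch`
      exits    0x10fa53 `done:` (At32) · 0x10f2a3 the `while` head for ch = 2 (At15) · 0x10f64c the one for ch > 2 (At22)

  Every store of the segment goes into the scratch slots of the function's own frame, so `Common` is carried by the lemmas of
  Lemmas.lean (`kept_of_scratch`, `common_of_kept`, `fill_of_kept`). The one check site (0x10ef31, `do_not_decode[j]`) is inside
  the caller's live array (P2: `dndLiveIn`). `entry1` = the loop (`u_loop`, postcondition `AfterJ` at 0x10ef41) + `tail1`.
-/

open X86 X86.User Asan Vorbis Vorbis.Spec Vorbis.Spec.DecodeResidue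

set_option maxRecDepth 4000
set_option maxHeartbeats 4000000

namespace Vorbis.Spec.decode_residue_3

/-- **Entry 2** (0x10f6a0, the latch `add DWORD PTR [rbp-0xa0],1` of the pass loop 2163): `pass + 1 > 7` → `done:` with
`r15d = tap` reloaded from `[rbp−0xdc]`; else the `while` head of pass `pass + 1` for `ch = 2` (0x10f2a3) or `ch > 2` (0x10f64c)
with `class_set = pcount = 0` and FILL(0, KK) carried over the two stores. The arm `jle 10f6a0` at 0x10f6c4 is dead. -/
theorem entry2 (Lay : Layout) (hLay : Lay.hi = 0x1000000) (μ : Microarch) (hμ : UserX.MicroOK μ) (u₀ : State)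
    (hcode : HasCodeNat Lay u₀ Vorbis.L.decode_residue.entry Vorbis.Code.code_decode_residue.nat Vorbis.L.decode_residue.size)
    (g : G) (hent : Entered u₀ g) (pass : Nat) (v : State) (hat : At24 u₀ g pass v) :
    ReachVia Lay μ WayInv v (fun v' => At32 u₀ g v' ∨ At15 u₀ g (pass + 1) 0 0 v' ∨ At22 u₀ g (pass + 1) 0 0 v') := by
  -- 1. the ENTRY state's facts (about `g.e`) and the assertion's fields
  have he := hent.entry
  v_entry he
  obtain ⟨hrip, c, hpath, hr15, hfill⟩ := hat
  -- 2. the present state for the walker: rip, the registers (NOT named `w_…`: the walker clears those), code, DF / MXCSR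
  have w_rip := hrip
  have c_rsp := c.rsp
  have c_rbp := c.rbp
  have c_r15 := hr15
  have w_eq : Mem.EqOn Vorbis.L.textLo Vorbis.L.textHi u₀.mem v.mem := c.code
  have hdf : v.flags .df = false := (show abiInv _ from c.inv).1
  have hmx : v.mxcsr &&& 0x1F80 = 0x1F80 := (show abiInv _ from c.inv).2
  have hsse := Vorbis.sseOK_of_abiInv c.inv
  -- 3. the stack slots: those the segment loads, and the frame slots of COMMON (read back by `u_resolve` at the exits)
  have s_pass := hpath.sl_pass
  have s_tap := hpath.sl_tap
  have s_n := hpath.sl_n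
  have hpass := hpath.pass_le
  have k_rbp := c.s_rbp
  have k_r15 := c.s_r15
  have k_r14 := c.s_r14
  have k_r13 := c.s_r13
  have k_r12 := c.s_r12
  have k_rbx := c.s_rbx
  have f_f := c.fr_f
  have f_rb := c.fr_rb
  have f_ch := c.fr_ch
  have f_prd := c.fr_prd
  have f_w := c.fr_w
  have f_rtype := c.fr_rtype
  have f_pcd := c.fr_pcd
  have f_si := c.fr_si
  u_walk hcode [hμ.vendor] until [Vorbis.L.decode_residue.cut32, Vorbis.L.decode_residue.cut15, Vorbis.L.decode_residue.cut22, Vorbis.L.decode_residue.cut24] span [Vorbis.L.textLo, Vorbis.L.textHi] side (v_side)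
  · -- 0x10f6ae taken: pass + 1 > 7, through 0x10f6e4 (`r15d = tap`) to `done:` (0x10fa53)
    have hst : Mem.SameExcept [⟨(g.e.reg .rsp).toNat - 256, (g.e.reg .rsp).toNat - 152⟩] v.mem s_10f6eb.mem := by
      u_same
    have hk := kept_of_scratch hent c hst
    refine ReachVia.done (Or.inl ⟨w_rip, ?_, ?_⟩)
    · apply common_of_kept hent c hk
      · rw [w_kept .rbp rfl]
        exact c_rbp
      · rw [w_kept .rsp rfl]
        exact c_rsp
      · exact w_eq
      · v_inv
      all_goals u_resolve
    · rw [w_r15]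
      exact ofBV32_of_lt g.tap (tap_lt hent)
  · -- 0x10f6b7 taken: ch = 2, the init at 0x10f2f1, to the `while` head 0x10f2a3
    have hnext := pass_next pass hpass hbr_10f6ae
    rw [pass_succ pass hpass] at w_mem
    have hch2 : g.ch = 2 := by
      have := ch_lt g
      omega
    have hst : Mem.SameExcept [⟨(g.e.reg .rsp).toNat - 256, (g.e.reg .rsp).toNat - 152⟩] v.mem s_10f30a.mem := by
      u_same
    have hk := kept_of_scratch hent c hst
    have hC := ch_le16 hent
    refine ReachVia.done (Or.inr (Or.inl ⟨w_rip, ?_, hch2, w_r14, ⟨hpath.rtype2, hpath.ch_ge, hnext, ?_, ?_, ?_⟩, ?_, ?_, ?_⟩))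
    · apply common_of_kept hent c hk
      · rw [w_kept .rbp rfl]
        exact c_rbp
      · rw [w_kept .rsp rfl]
        exact c_rsp
      · exact w_eq
      · v_inv
      all_goals u_resolve
    · u_resolve
      omega
    · u_resolve
    · u_resolve
    · rw [w_r15]
      exact ofBV32_zero
    · u_resolve
    · apply WInv.initK (by omega)
      intro j hj
      have e : j = 0 := hj
      subst e
      exact fill_of_kept hent c hk (by omega) hfill
  · -- 0x10f6c4 `jle 10f6a0` taken: never (ch ≥ 2 on path A, and ch ≠ 2 here, so ch > 2)
    exfalso
    have hge := hpath.ch_ge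
    have hC := ch_le16 hent
    have hlt := ch_lt g
    have e : (BitVec.ofNat 32 g.ch).toInt = (g.ch : Int) := by
      rw [toInt_of_lt _ (by rw [toNat_ofNat32 _ hlt]; omega), toNat_ofNat32 _ hlt]
    rw [e] at hbr_10f6c4
    have e2 : (2#32).toInt = 2 := by decide
    omega
  · -- ch > 2: the init at 0x10f6c6, to the `while` head 0x10f64c
    have hnext := pass_next pass hpass hbr_10f6ae
    rw [pass_succ pass hpass] at w_mem
    have hch3 : 3 ≤ g.ch := by
      have := ch_lt g
      have := hpath.ch_ge
      omega
    have hst : Mem.SameExcept [⟨(g.e.reg .rsp).toNat - 256, (g.e.reg .rsp).toNat - 152⟩] v.mem s_10f6df.mem := by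
      u_same
    have hk := kept_of_scratch hent c hst
    have hC := ch_le16 hent
    refine ReachVia.done (Or.inr (Or.inr ⟨w_rip, ?_, hch3, w_r12, ⟨hpath.rtype2, hpath.ch_ge, hnext, ?_, ?_, ?_⟩, ?_, ?_, ?_⟩))
    · apply common_of_kept hent c hk
      · rw [w_kept .rbp rfl]
        exact c_rbp
      · rw [w_kept .rsp rfl]
        exact c_rsp
      · exact w_eq
      · v_inv
      all_goals u_resolve
    · u_resolve
      omega
    · u_resolve
    · u_resolve
    · rw [w_r15]
      exact ofBV32_zero
    · u_resolve
    · apply WInv.initK (by omega)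
      intro j hj
      have e : j = 0 := hj
      subst e
      exact fill_of_kept hent c hk (by omega) hfill

/-- **From 0x10ef41 (`if (j == ch) goto done`) to the exits of entry 1**: `j = ch` → `done:` with `r15d = tap` untouched; else
`ch ≥ 2` (`ch ≠ 1`, and `j ≤ ch`, `j ≠ ch` excludes 0): `pass := 0`, `[rbp−0xdc] := tap`, `r15 := r`, the head of the pass loop
(0 > 7 never), the dispatch on `ch` and the init of the `while` (`WInv.init0`). The arm `jle 10f6a0` at 0x10f6c4 is dead. -/
theorem tail1 (Lay : Layout) (hLay : Lay.hi = 0x1000000) (μ : Microarch) (hμ : UserX.MicroOK μ) (u₀ : State)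
    (hcode : HasCodeNat Lay u₀ Vorbis.L.decode_residue.entry Vorbis.Code.code_decode_residue.nat Vorbis.L.decode_residue.size)
    (g : G) (hent : Entered u₀ g) (v : State) (c : Common u₀ g v) (hrtype2 : g.rtype = 2) (hch_ne : g.ch ≠ 1)
    (s : State) (haf : AfterJ u₀ g v s) :
    ReachVia Lay μ WayInv s (fun v' => At32 u₀ g v' ∨ At15 u₀ g 0 0 0 v' ∨ At22 u₀ g 0 0 0 v') := by
  have he := hent.entry
  v_entry he
  obtain ⟨w_rip, ⟨j, hjle, c_r12⟩, c_rbp, c_rsp, c_r15, hcd, hinv, hsame, l_r, l_n, l_rbp, l_r15, l_r14, l_r13, l_r12,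
    l_rbx, l_f, l_rb, l_ch, l_prd, l_w, l_rtype, l_pcd, l_si⟩ := haf
  have w_eq : Mem.EqOn Vorbis.L.textLo Vorbis.L.textHi u₀.mem s.mem := hcd
  have hdf : s.flags .df = false := (show abiInv _ from hinv).1
  have hmx : s.mxcsr &&& 0x1F80 = 0x1F80 := (show abiInv _ from hinv).2
  have hsse := Vorbis.sseOK_of_abiInv hinv
  have hC := ch_le16 hent
  have htap := tap_lt hent
  have e_part := part32_ofNat j (by omega)
  have e_tap := part32_ofNat g.tap htap
  have e_tap2 := toNat_ofNat32 g.tap htap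
  u_walk hcode [hμ.vendor, e_part, e_tap, e_tap2] until [Vorbis.L.decode_residue.cut32, Vorbis.L.decode_residue.cut15, Vorbis.L.decode_residue.cut22, Vorbis.L.decode_residue.cut24] span [Vorbis.L.textLo, Vorbis.L.textHi] side (v_side)
  · -- 0x10ef51 taken: j = ch (every channel is marked do-not-decode, or ch = 0): to `done:` with r15d = tap
    have hst : Mem.SameExcept [⟨(g.e.reg .rsp).toNat - 256, (g.e.reg .rsp).toNat - 152⟩] v.mem s_10ef51.mem := by
      u_same
    have hk := kept_of_scratch hent c hst
    refine ReachVia.done (Or.inl ⟨w_rip, ?_, ?_⟩)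
    · apply common_of_kept hent c hk
      · rw [w_kept .rbp rfl]
        exact c_rbp
      · rw [w_kept .rsp rfl]
        exact c_rsp
      · exact w_eq
      · v_inv
      all_goals u_resolve
    · rw [w_kept .r15 rfl]
      exact c_r15
  · -- 0x10f6ae taken with pass = 0: never (7 < 0)
    exact absurd hbr_10f6ae (by decide)
  · -- j ≠ ch, ch = 2: pass := 0, [rbp−0xdc] := tap, the init at 0x10f2f1, to the `while` head 0x10f2a3
    have hch2 : g.ch = 2 := by
      have := ch_lt g
      omega
    have hst : Mem.SameExcept [⟨(g.e.reg .rsp).toNat - 256, (g.e.reg .rsp).toNat - 152⟩] v.mem s_10f30a.mem := by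
      u_same
    have hk := kept_of_scratch hent c hst
    refine ReachVia.done (Or.inr (Or.inl ⟨w_rip, ?_, hch2, w_r14, ⟨hrtype2, by omega, by omega, ?_, ?_, ?_⟩, ?_, ?_, ?_⟩))
    · apply common_of_kept hent c hk
      · rw [w_kept .rbp rfl]
        exact c_rbp
      · rw [w_kept .rsp rfl]
        exact c_rsp
      · exact w_eq
      · v_inv
      all_goals u_resolve
    · u_resolve
    · u_resolve
      omega
    · u_resolve
    · rw [w_r15]
      exact ofBV32_zero
    · u_resolve
    · exact WInv.init0 _ _ _ _ _ _ _ _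
  · -- 0x10f6c4 `jle 10f6a0` taken: never (j ≤ ch, j ≠ ch, ch ≠ 1, ch ≠ 2, so ch > 2)
    exfalso
    have hlt := ch_lt g
    have e := toInt32_ofNat g.ch (by omega)
    rw [e] at hbr_10f6c4
    have e2 : (2#32).toInt = 2 := by decide
    omega
  · -- j ≠ ch, ch > 2: pass := 0, [rbp−0xdc] := tap, the init at 0x10f6c6, to the `while` head 0x10f64c
    have hch3 : 3 ≤ g.ch := by
      have := ch_lt g
      omega
    have hst : Mem.SameExcept [⟨(g.e.reg .rsp).toNat - 256, (g.e.reg .rsp).toNat - 152⟩] v.mem s_10f6df.mem := by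
      u_same
    have hk := kept_of_scratch hent c hst
    refine ReachVia.done (Or.inr (Or.inr ⟨w_rip, ?_, hch3, w_r12, ⟨hrtype2, by omega, by omega, ?_, ?_, ?_⟩, ?_, ?_, ?_⟩))
    · apply common_of_kept hent c hk
      · rw [w_kept .rbp rfl]
        exact c_rbp
      · rw [w_kept .rsp rfl]
        exact c_rsp
      · exact w_eq
      · v_inv
      all_goals u_resolve
    · u_resolve
    · u_resolve
      omega
    · u_resolve
    · rw [w_r15]
      exact ofBV32_zero
    · u_resolve
    · exact WInv.init0 _ _ _ _ _ _ _ _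

/-- **Entry 1** (0x10ef08, path A): `r` is spilled to `[rbp−0xb8]`, loop 2157 runs over `do_not_decode[0 .. ch)` (invariant:
`r12d = j ≤ ch`, the frame slots, the footprint; measure `ch − j`; one check site), and is left to 0x10ef41 (`AfterJ`), from
where `tail1` goes on. -/
theorem entry1 (Lay : Layout) (hLay : Lay.hi = 0x1000000) (μ : Microarch) (hμ : UserX.MicroOK μ) (u₀ : State)
    (hcode : HasCodeNat Lay u₀ Vorbis.L.decode_residue.entry Vorbis.Code.code_decode_residue.nat Vorbis.L.decode_residue.size)
    (hload1 : Asan.SmallCheck Lay μ Vorbis.WayInv (Vorbis.CodeOK u₀) [.rax, .rdx] 1 Vorbis.L.__asan_load1_noabort.entry)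
    (g : G) (hent : Entered u₀ g) (v : State) (hat : At8 u₀ g v) :
    ReachVia Lay μ WayInv v (fun v' => At32 u₀ g v' ∨ At15 u₀ g 0 0 0 v' ∨ At22 u₀ g 0 0 0 v') := by
  -- 1. the ENTRY state's facts (about `g.e`) and the assertion's fields
  have he := hent.entry
  v_entry he
  obtain ⟨hrip, c, hrtype2, hch_ne, hr14, hr15, hsl_dnd, hsl_n⟩ := hat
  -- 2. the present state for the walker: rip, the registers, code, DF / MXCSR
  have w_rip := hrip
  have c_rsp := c.rsp
  have c_rbp := c.rbp
  have c_r14 := hr14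
  have c_r15 := hr15
  have w_eq : Mem.EqOn Vorbis.L.textLo Vorbis.L.textHi u₀.mem v.mem := c.code
  have hdf : v.flags .df = false := (show abiInv _ from c.inv).1
  have hmx : v.mxcsr &&& 0x1F80 = 0x1F80 := (show abiInv _ from c.inv).2
  have hsse := Vorbis.sseOK_of_abiInv c.inv
  -- 3. the frame slots of COMMON
  have k_rbp := c.s_rbp
  have k_r15 := c.s_r15
  have k_r14 := c.s_r14
  have k_r13 := c.s_r13
  have k_r12 := c.s_r12
  have k_rbx := c.s_rbx
  have f_f := c.fr_f
  have f_rb := c.fr_rb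
  have f_ch := c.fr_ch
  have f_prd := c.fr_prd
  have f_w := c.fr_w
  have f_rtype := c.fr_rtype
  have f_pcd := c.fr_pcd
  have f_si := c.fr_si
  u_walk hcode [hμ.vendor] until [Vorbis.L.decode_residue.loop4] span [Vorbis.L.textLo, Vorbis.L.textHi] side (v_side)
  -- 0x10ef23, the head of loop 2157: `r12d = j`, `0 ≤ j ≤ ch`; the exact memory is replaced by the frame facts
  have hj0 : s_10ef1c.reg .r12 = UInt64.ofNat 0 := by
    rw [w_r12]
    exact ofBV32_zero
  obtain ⟨j, hj, hjle⟩ : ∃ j : Nat, s_10ef1c.reg .r12 = UInt64.ofNat j ∧ j ≤ g.ch :=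
    ⟨0, hj0, Nat.zero_le _⟩
  clear hj0
  have hst : Mem.SameExcept [⟨(g.e.reg .rsp).toNat - 256, (g.e.reg .rsp).toNat - 152⟩] v.mem s_10ef1c.mem := by
    u_same
  have l_r : UInt64.ofNat (s_10ef1c.mem.readLE (g.e.reg .rsp - 192) 8) = UInt64.ofNat g.r := by u_resolve
  have l_dnd : UInt64.ofNat (s_10ef1c.mem.readLE (g.e.reg .rsp - 168) 8) = g.e.reg .r9 := by u_resolve
  have l_n : s_10ef1c.mem.readLE (g.e.reg .rsp - 208) 4 = g.n := by u_resolve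
  have l_rbp : UInt64.ofNat (s_10ef1c.mem.readLE (g.e.reg .rsp - 8) 8) = g.e.reg .rbp := by u_resolve
  have l_r15 : UInt64.ofNat (s_10ef1c.mem.readLE (g.e.reg .rsp - 16) 8) = g.e.reg .r15 := by u_resolve
  have l_r14 : UInt64.ofNat (s_10ef1c.mem.readLE (g.e.reg .rsp - 24) 8) = g.e.reg .r14 := by u_resolve
  have l_r13 : UInt64.ofNat (s_10ef1c.mem.readLE (g.e.reg .rsp - 32) 8) = g.e.reg .r13 := by u_resolve
  have l_r12 : UInt64.ofNat (s_10ef1c.mem.readLE (g.e.reg .rsp - 40) 8) = g.e.reg .r12 := by u_resolve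
  have l_rbx : UInt64.ofNat (s_10ef1c.mem.readLE (g.e.reg .rsp - 48) 8) = g.e.reg .rbx := by u_resolve
  have l_f : UInt64.ofNat (s_10ef1c.mem.readLE (g.e.reg .rsp - 184) 8) = g.e.reg .rdi := by u_resolve
  have l_rb : UInt64.ofNat (s_10ef1c.mem.readLE (g.e.reg .rsp - 216) 8) = g.e.reg .rsi := by u_resolve
  have l_ch : s_10ef1c.mem.readLE (g.e.reg .rsp - 156) 4 = g.ch := by u_resolve
  have l_prd : s_10ef1c.mem.readLE (g.e.reg .rsp - 196) 4 = g.PRD := by u_resolve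
  have l_w : s_10ef1c.mem.readLE (g.e.reg .rsp - 200) 4 = g.W := by u_resolve
  have l_rtype : s_10ef1c.mem.readLE (g.e.reg .rsp - 232) 4 = g.rtype := by u_resolve
  have l_pcd : s_10ef1c.mem.readLE (g.e.reg .rsp - 176) 8 = g.TB.base := by u_resolve
  have l_si : s_10ef1c.mem.readLE (g.e.reg .rsp - 240) 8 = (g.RA - 152) / 8 := by u_resolve
  have hdfs : s_10ef1c.flags .df = false := by
    rw [w_flags]
    exact hdf
  have w_rsp : s_10ef1c.reg .rsp = g.e.reg .rsp - 248 := by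
    rw [w_kept .rsp rfl]
    exact c_rsp
  replace w_kept := w_kept.mono_all (S' := [.r14, .r13, .r12, .rbx, .rdi, .rax, .rdx, .rsp]) (by rfl)
  clear w_mem w_flags w_r12
  u_loop [j] (fun x => g.ch - (x.reg .r12).toNat) (fun x => AfterJ u₀ g v x)
  · -- the body of loop 2157, walked to the back edge and to the two ways out (0x10ef26 `jge`, 0x10ef39 `je`)
    have hC := ch_le16 hent
    have hds := hent.args.dnd_stack
    have e_part := part32_ofNat j (by omega)
    have e_sx := sx32_ofNat j (by omega)
    have e_ji := toInt32_ofNat j (by omega)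
    have e_chi := toInt32_ofNat g.ch (by omega)
    u_walk hcode [hμ.vendor, e_part, e_sx] until [Vorbis.L.decode_residue.loop4, afterLoop] span [Vorbis.L.textLo, Vorbis.L.textHi] side (v_side)
    · -- the check of `do_not_decode[j]` (0x10ef31): j < ch, inside the caller's live array
      rw [e_ji, e_chi] at hbr_10ef26
      have hst' : Mem.SameExcept [⟨(g.e.reg .rsp).toNat - 256, (g.e.reg .rsp).toNat - 152⟩] v.mem s_10ef31.mem := by
        u_same
      have hun := (kept_of_scratch hent c hst').shadow
      have e9 : (g.e.reg .r9).toNat = g.dnd := rfl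
      have ea : (UInt64.ofNat j + g.e.reg .r9).toNat = g.dnd + j := by
        rw [toNat_add_ofNat' j _ (by omega)]
        omega
      have h1 : g.dnd ≤ (UInt64.ofNat j + g.e.reg .r9).toNat := by
        omega
      have h2 : (UInt64.ofNat j + g.e.reg .r9).toNat + 1 ≤ g.dnd + g.ch := by
        omega
      exact (dndLiveIn hent).accSmall c.shadow hun _ 1 (by decide) h1 h2
    · -- 0x10ef26 `jge` taken (j ≥ ch): the loop is left
      u_loop_exit
      refine ⟨w_rip, ⟨j, hjle, w_r12⟩, ?_, w_rsp, ?_, w_eq, ?_, ?_, ?_, ?_, ?_, ?_, ?_, ?_, ?_, ?_, ?_, ?_, ?_, ?_, ?_, ?_, ?_,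
        ?_⟩
      · rw [w_kept .rbp rfl]
        exact c_rbp
      · rw [w_kept .r15 rfl]
        exact c_r15
      · v_inv
      · u_same
      all_goals u_resolve
    · -- 0x10ef39 `je` taken (do_not_decode[j] = 0): the loop is left
      u_loop_exit
      refine ⟨w_rip, ⟨j, hjle, w_r12⟩, ?_, w_rsp, ?_, w_eq, ?_, ?_, ?_, ?_, ?_, ?_, ?_, ?_, ?_, ?_, ?_, ?_, ?_, ?_, ?_, ?_, ?_,
        ?_⟩
      · rw [w_kept .rbp rfl]
        exact c_rbp
      · rw [w_kept .r15 rfl]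
        exact c_r15
      · v_inv
      · u_same
      all_goals u_resolve
    · -- the back edge 0x10ef3f: `++j`
      rw [e_ji, e_chi] at hbr_10ef26
      have hj1 : j + 1 ≤ g.ch := by omega
      have e12 := succ32_ofNat j (by omega)
      u_loop_back [j + 1]
      · exact w_rip.trans (by decide)
      · rw [w_r12]
        exact e12
      · -- the direction flag: the check kept it, the `add` wrote status flags only
        rw [w_flags]
        simp only [X86.User.df_setStatus]
        exact w_df_10ef31
      · -- the measure ch − j
        have e0 : (UInt64.ofNat j).toNat = j := toNat_addr j (by omega)
        have e1 : (UInt64.ofNat (j + 1)).toNat = j + 1 := toNat_addr (j + 1) (by omega)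
        rw [w_r12, e12, e1, e0]
        omega
  · -- after the loop: 0x10ef41
    exact tail1 Lay hLay μ hμ u₀ hcode g hent v c hrtype2 hch_ne s_10ef1c u_post

end Vorbis.Spec.decode_residue_3

/-- Segment 3 of `decode_residue` takes each of its two entry assertions (`At8` at 0x10ef08, `At24` at 0x10f6a0) to one of its
exit assertions (`At32`, `At15`, `At22`). -/
theorem Vorbis.Spec.Worked.decode_residue_3_ok : Vorbis.Spec.decode_residue_3.Statement := by
  unfold Vorbis.Spec.decode_residue_3.Statement
  intro Lay hLay μ hμ u₀ hcode hload1 g hent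
  constructor
  · intro v hat
    exact Vorbis.Spec.decode_residue_3.entry1 Lay hLay μ hμ u₀ hcode hload1 g hent v hat
  · intro pass v hat
    exact Vorbis.Spec.decode_residue_3.entry2 Lay hLay μ hμ u₀ hcode g hent pass v hat
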